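-- pv_equiv track=rewrite | github.com/franaljam/cronparse | cronparse/normalizer.py | _field_to_canonical
-- ===== SOURCE A (Python) =====
-- def _field_to_canonical(values: list[int], lo: int, hi: int) -> str:
--     """Convert a sorted list of integers back to the most compact cron token."""
--     full = list(range(lo, hi + 1))
--     if values == full:
--         return "*"
--
--     # Detect uniform step starting from lo
--     if len(values) >= 2:
--         step = values[1] - values[0]
--         if step > 1 and all(values[i] - values[i - 1] == step for i in range(1, len(values))):
--             if values[0] == lo and values[-1] <= hi:
--                 return f"*/{step}"
--
--     # Detect a contiguous range
--     if len(values) > 1 and values == list(range(values[0], values[-1] + 1)):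
--         return f"{values[0]}-{values[-1]}"
--
--     return ",".join(str(v) for v in values)
-- ===== SOURCE B (Python) =====
-- def _field_to_canonical(values: list[int], lo: int, hi: int) -> str:
--     """Pick the most compact cron token whose expansion is exactly `values`.
--
--     Candidate tokens are generated together with the list they expand to;
--     the first candidate that round-trips wins, otherwise the values are
--     comma-joined (which always round-trips).
--     """
--     candidates = [("*", range(lo, hi + 1))]
--     if len(values) >= 2:
--         step = values[1] - values[0]
--         if step > 1:
--             candidates.append(("*/%d" % step, range(lo, hi + 1, step)))
--         candidates.append(("%d-%d" % (values[0], values[-1]),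
--                           range(values[0], values[-1] + 1)))
--     for token, expansion in candidates:
--         if values == list(expansion):
--             return token
--     return ",".join(str(v) for v in values)
-- ===== Notes on version B (the rewrite author's own statement) =====
-- stated objective: alternative
-- what changed: B is generate-and-test: it builds the candidate tokens paired with the value list each one expands to and returns the first candidate whose expansion equals the input, instead of A's per-branch condition checks with index arithmetic; this also fixes A's loose '*/step' test, which never verifies the token's actual expansion.
-- intended difference: On inputs where values is a step>1 arithmetic progression starting at lo with last value <= hi but unequal to list(range(lo, hi+1, step)) (it stops short of the pattern's full expansion), A returns '*/step' although that token expands to a different list, while B returns the comma-joined values, the token that actually round-trips. — e.g. on _field_to_canonical([0, 2], 0, 4): A returns "*/2", B returns "0,2"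
import Mathlib
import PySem

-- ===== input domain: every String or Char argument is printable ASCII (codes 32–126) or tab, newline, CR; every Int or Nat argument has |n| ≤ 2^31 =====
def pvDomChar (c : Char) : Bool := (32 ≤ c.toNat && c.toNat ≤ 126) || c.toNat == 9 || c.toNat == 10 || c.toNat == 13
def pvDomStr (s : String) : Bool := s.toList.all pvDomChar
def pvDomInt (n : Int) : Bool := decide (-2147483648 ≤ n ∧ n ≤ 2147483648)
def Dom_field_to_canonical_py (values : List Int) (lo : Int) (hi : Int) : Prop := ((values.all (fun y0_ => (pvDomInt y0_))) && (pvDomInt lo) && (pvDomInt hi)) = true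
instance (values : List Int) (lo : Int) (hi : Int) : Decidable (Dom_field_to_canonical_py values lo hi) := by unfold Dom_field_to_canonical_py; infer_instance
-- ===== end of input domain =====

-- B generates candidate tokens paired with the list each expands to and returns the first whose
-- expansion equals the input (objective: alternative); it thereby fixes A's loose '*/step' test,
-- which emits the token without checking its actual expansion — that corner is stated as D_.

-- ===== PORT A =====
-- A's last two statements (contiguous-range detection + comma join), shared by A's fall-through paths
def fieldA_rest (values : List Int) : String :=
  if 1 < values.length ∧
      values = PySem.List.pyRange (PySem.List.pyGetD values 0 0)
        (PySem.List.pyGetD values (-1) 0 + 1) 1 then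
    PySem.Int.toStr (PySem.List.pyGetD values 0 0) ++ "-" ++
      PySem.Int.toStr (PySem.List.pyGetD values (-1) 0)
  else
    PySem.Str.join "," (values.map PySem.Int.toStr)

def field_to_canonical_py (values : List Int) (lo : Int) (hi : Int) : String :=
  let full := PySem.List.pyRange lo (hi + 1) 1
  if values = full then "*"
  else if 2 ≤ values.length then
    let step := PySem.List.pyGetD values 1 0 - PySem.List.pyGetD values 0 0
    if 1 < step ∧ ∀ i ∈ PySem.List.pyRange 1 (PySem.List.len values) 1,
        PySem.List.pyGetD values i 0 - PySem.List.pyGetD values (i - 1) 0 = step then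
      if PySem.List.pyGetD values 0 0 = lo ∧ PySem.List.pyGetD values (-1) 0 ≤ hi then
        "*/" ++ PySem.Int.toStr step
      else fieldA_rest values
    else fieldA_rest values
  else fieldA_rest values

-- ===== PORT B =====
-- B's final loop: first candidate whose expansion equals `values`, else comma join
def fieldB_pick (values : List Int) : List (String × List Int) → String
  | [] => PySem.Str.join "," (values.map PySem.Int.toStr)
  | (tok, expansion) :: rest => if values = expansion then tok else fieldB_pick values rest

def field_to_canonical_py_alt (values : List Int) (lo : Int) (hi : Int) : String :=
  let base := [("*", PySem.List.pyRange lo (hi + 1) 1)]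
  let candidates :=
    if 2 ≤ values.length then
      let step := PySem.List.pyGetD values 1 0 - PySem.List.pyGetD values 0 0
      (base ++ (if 1 < step then
          [("*/" ++ PySem.Int.toStr step, PySem.List.pyRange lo (hi + 1) step)]
        else [])) ++
      [(PySem.Int.toStr (PySem.List.pyGetD values 0 0) ++ "-" ++
          PySem.Int.toStr (PySem.List.pyGetD values (-1) 0),
        PySem.List.pyRange (PySem.List.pyGetD values 0 0)
          (PySem.List.pyGetD values (-1) 0 + 1) 1)]
    else base
  fieldB_pick values candidates

-- ===== PRECONDITION & SPEC =====
-- the consecutive-difference list of the input (used only to state D_; neither port computes it)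
def pvDiffs (v : List Int) : List Int := (v.zip v.tail).map fun p => p.2 - p.1

-- On inputs where values is a step>1 arithmetic progression starting at lo that stops short of hi
-- (one more step would still fit, so it is not the pattern's full expansion), A returns '*/step'
-- although that token expands to a different list, while B returns the comma-joined values — the
-- token that actually round-trips.
def D_field_to_canonical_py (values : List Int) (lo : Int) (hi : Int) : Prop :=
  2 ≤ values.length ∧
  1 < values.tail.head?.getD 0 - values.head?.getD 0 ∧
  (∀ d ∈ pvDiffs values, d = values.tail.head?.getD 0 - values.head?.getD 0) ∧
  values.head?.getD 0 = lo ∧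
  values.getLast?.getD 0 + (values.tail.head?.getD 0 - values.head?.getD 0) ≤ hi
instance (values : List Int) (lo : Int) (hi : Int) : Decidable (D_field_to_canonical_py values lo hi) := by unfold D_field_to_canonical_py; infer_instance

def Spec_field_to_canonical_py (values : List Int) (lo : Int) (hi : Int) (out : String) : Prop := ¬ D_field_to_canonical_py values lo hi → out = field_to_canonical_py_alt values lo hi
instance (values : List Int) (lo : Int) (hi : Int) (out : String) : Decidable (Spec_field_to_canonical_py values lo hi out) := by unfold Spec_field_to_canonical_py; infer_instance

def pvDiffWitness_field_to_canonical_py : List Int × Int × Int := ([0, 2], 0, 4)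
def pvDiffWitnessOut_field_to_canonical_py : String × String := ("*/2", "0,2")

-- ===== CLAIM (what is proved, stated in full; the proofs are below) =====
def Claim_unchanged_field_to_canonical_py : Prop := ∀ (values : List Int) (lo : Int) (hi : Int), Dom_field_to_canonical_py values lo hi → Spec_field_to_canonical_py values lo hi (field_to_canonical_py values lo hi)
def Claim_changed_field_to_canonical_py : Prop := Dom_field_to_canonical_py (pvDiffWitness_field_to_canonical_py.1) (pvDiffWitness_field_to_canonical_py.2.1) (pvDiffWitness_field_to_canonical_py.2.2) ∧ D_field_to_canonical_py (pvDiffWitness_field_to_canonical_py.1) (pvDiffWitness_field_to_canonical_py.2.1) (pvDiffWitness_field_to_canonical_py.2.2) ∧ field_to_canonical_py (pvDiffWitness_field_to_canonical_py.1) (pvDiffWitness_field_to_canonical_py.2.1) (pvDiffWitness_field_to_canonical_py.2.2) = pvDiffWitnessOut_field_to_canonical_py.1 ∧ field_to_canonical_py_alt (pvDiffWitness_field_to_canonical_py.1) (pvDiffWitness_field_to_canonical_py.2.1) (pvDiffWitness_field_to_canonical_py.2.2) = pvDiffWitnessOut_field_to_canonical_py.2 ∧ pvDiffWitnessOut_field_to_canonical_py.1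 ≠ pvDiffWitnessOut_field_to_canonical_py.2

def Claim_exact_field_to_canonical_py : Prop := ∀ (values : List Int) (lo : Int) (hi : Int), Dom_field_to_canonical_py values lo hi → D_field_to_canonical_py values lo hi → field_to_canonical_py values lo hi ≠ field_to_canonical_py_alt values lo hi

-- ===== LEMMAS AND PROOFS =====

theorem length_pvDiffs (v : List Int) : (pvDiffs v).length = v.length - 1 := by
  simp [pvDiffs]

theorem getElem_pvDiffs (v : List Int) (k : Nat) (h : k < (pvDiffs v).length) :
    (pvDiffs v)[k] = v[k + 1]'(by rw [length_pvDiffs] at h; omega) -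
      v[k]'(by rw [length_pvDiffs] at h; omega) := by
  simp [pvDiffs, List.getElem_tail]

theorem forall_pvDiffs (v : List Int) (s : Int) :
    (∀ d ∈ pvDiffs v, d = s) ↔
      (∀ k : Nat, (hk : k + 1 < v.length) → v[k + 1] - v[k] = s) := by
  rw [List.forall_mem_iff_getElem]
  constructor
  · intro h k hk
    have hk' : k < (pvDiffs v).length := by rw [length_pvDiffs]; omega
    have := h k hk'
    rwa [getElem_pvDiffs] at this
  · intro h k hk
    rw [getElem_pvDiffs]
    exact h k (by rw [length_pvDiffs] at hk; omega)

theorem pyGetD_toNat (v : List Int) (i : Int) (k : Nat) (hik : i = (k : Int))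
    (hk : k < v.length) : PySem.List.pyGetD v i 0 = v[k] := by
  subst hik
  rw [PySem.List.pyGetD_natCast]
  exact List.getD_eq_getElem v 0 hk

-- A's inner all-loop over range(1, len(values)) says exactly "every difference equals step"
theorem allstep_iff (v : List Int) (s : Int) :
    (∀ i ∈ PySem.List.pyRange 1 (PySem.List.len v) 1,
        PySem.List.pyGetD v i 0 - PySem.List.pyGetD v (i - 1) 0 = s) ↔
      (∀ d ∈ pvDiffs v, d = s) := by
  rw [forall_pvDiffs]
  constructor
  · intro h k hk
    have hm : ((k + 1 : Nat) : Int) ∈ PySem.List.pyRange 1 (PySem.List.len v) 1 := by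
      rw [PySem.List.mem_pyRange_one, PySem.List.len_eq]
      push_cast
      omega
    have := h ((k + 1 : Nat) : Int) hm
    rwa [pyGetD_toNat v _ (k + 1) (by push_cast; omega) hk,
      pyGetD_toNat v _ k (by push_cast; omega) (by omega)] at this
  · intro h i hi
    rw [PySem.List.mem_pyRange_one, PySem.List.len_eq] at hi
    rw [pyGetD_toNat v i i.toNat (by omega) (by omega),
      pyGetD_toNat v (i - 1) (i.toNat - 1) (by omega) (by omega)]
    have hk : i.toNat - 1 + 1 < v.length := by omega
    have := h (i.toNat - 1) hk
    have he : i.toNat - 1 + 1 = i.toNat := by omega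
    simp only [he] at this
    exact this

theorem getElem_pyRange_pos (a b s : Int) (hs : 0 < s) (k : Nat)
    (hk : k < (PySem.List.pyRange a b s).length) :
    (PySem.List.pyRange a b s)[k] = a + s * k := by
  rw [List.getElem_of_eq (PySem.List.pyRange_of_pos a b hs) hk]
  simp

-- what being equal to list(range(a, b, s)) (s > 0, at least two elements) says about the input
theorem range_step_char (v : List Int) (a b s : Int) (hs : 0 < s) (hlen : 2 ≤ v.length)
    (hv : v = PySem.List.pyRange a b s) :
    PySem.List.pyGetD v 0 0 = a ∧ PySem.List.pyGetD v (-1) 0 ≤ b - 1 ∧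
      (∀ d ∈ pvDiffs v, d = s) := by
  have hg : ∀ (k : Nat), (hk : k < v.length) → v[k] = a + s * k := by
    intro k hk
    rw [List.getElem_of_eq hv hk]
    exact getElem_pyRange_pos a b s hs k (hv ▸ hk)
  have hne : v ≠ [] := by
    intro h
    rw [h] at hlen
    simp at hlen
  refine ⟨?_, ?_, ?_⟩
  · rw [pyGetD_toNat v 0 0 rfl (by omega), hg 0 (by omega)]
    simp
  · have hne' : PySem.List.pyRange a b s ≠ [] := hv ▸ hne
    rw [hv, PySem.List.pyGetD_neg_one _ 0 hne']
    have := (PySem.List.mem_pyRange_iff_of_pos hs _).mp (List.getLast_mem hne')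
    omega
  · rw [forall_pvDiffs]
    intro k hk
    rw [hg (k + 1) hk, hg k (by omega)]
    push_cast
    ring

theorem pv_ediv_eq (N s n : Int) (hs : 0 < s) (h1 : s * n ≤ N) (h2 : N < s * (n + 1)) :
    N / s = n := by
  have h1' : n ≤ N / s := (Int.le_ediv_iff_mul_le hs).mpr (by nlinarith)
  have h2' : N / s < n + 1 := (Int.ediv_lt_iff_lt_mul hs).mpr (by nlinarith)
  omega

-- an arithmetic progression from lo whose next term would exceed hi IS list(range(lo, hi+1, s))
theorem ap_eq_range (v : List Int) (lo hi s : Int) (hs : 0 < s) (hl : 2 ≤ v.length)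
    (h0 : v.head?.getD 0 = lo) (hd : ∀ d ∈ pvDiffs v, d = s)
    (hlast : v.getLast?.getD 0 ≤ hi) (hfit : hi < v.getLast?.getD 0 + s) :
    v = PySem.List.pyRange lo (hi + 1) s := by
  have hg : ∀ k : Nat, (hk : k < v.length) → v[k] = lo + s * k := by
    intro k
    induction k with
    | zero =>
      intro hk
      have h00 : v.head?.getD 0 = v[0] := by
        rw [List.head?_eq_getElem?, List.getElem?_eq_getElem hk]
        rfl
      rw [← h00, h0]
      simp
    | succ k ih =>
      intro hk
      have hstep := (forall_pvDiffs v s).mp hd k hk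
      have hih := ih (by omega)
      have hring : s * ((k : Int) + 1) = s * (k : Int) + s := by ring
      push_cast
      linarith
  have hlastE : v.getLast?.getD 0 = lo + s * ((v.length - 1 : Nat) : Int) := by
    rw [List.getLast?_eq_getElem?, List.getElem?_eq_getElem (by omega)]
    simpa using hg (v.length - 1) (by omega)
  have hcast : ((v.length - 1 : Nat) : Int) = (v.length : Int) - 1 := by omega
  rw [hlastE, hcast] at hlast hfit
  have hab : lo < hi + 1 := by nlinarith
  have hq : (hi + 1 - lo + s - 1) / s = (v.length : Int) := by
    apply pv_ediv_eq _ _ _ hs <;> nlinarith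
  apply List.ext_getElem
  · rw [PySem.List.pyRange_of_pos lo (hi + 1) hs, List.length_map, List.length_range,
      if_pos hab]
    omega
  · intro i h1 h2
    rw [hg i h1, getElem_pyRange_pos lo (hi + 1) s hs i h2]

-- Python indexing on the A side, read off the list's structure
theorem pyGetD_zero_head (v : List Int) (h : v ≠ []) :
    PySem.List.pyGetD v 0 0 = v.head?.getD 0 := by
  rcases v with _ | ⟨a, t⟩
  · exact absurd rfl h
  · rw [pyGetD_toNat (a :: t) 0 0 rfl (by simp)]
    rfl

theorem pyGetD_one_tail (v : List Int) (h : 2 ≤ v.length) :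
    PySem.List.pyGetD v 1 0 = v.tail.head?.getD 0 := by
  rcases v with _ | ⟨a, _ | ⟨b, t⟩⟩
  · simp at h
  · simp at h
  · rw [pyGetD_toNat (a :: b :: t) 1 1 rfl (by simp)]
    rfl

theorem pyGetD_neg_one_last (v : List Int) (h : v ≠ []) :
    PySem.List.pyGetD v (-1) 0 = v.getLast?.getD 0 := by
  rw [PySem.List.pyGetD_neg_one v 0 h, List.getLast?_eq_some_getLast h]
  rfl

-- A's fall-through tail, written as the same conditional B's last candidate produces
theorem rest_eq2 (v : List Int) (hl : 2 ≤ v.length) :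
    fieldA_rest v =
      if 2 ≤ v.length ∧ v = PySem.List.pyRange (PySem.List.pyGetD v 0 0)
          (PySem.List.pyGetD v (-1) 0 + 1) 1 then
        PySem.Int.toStr (PySem.List.pyGetD v 0 0) ++ "-" ++
          PySem.Int.toStr (PySem.List.pyGetD v (-1) 0)
      else PySem.Str.join "," (v.map PySem.Int.toStr) := by
  unfold fieldA_rest
  by_cases hc : v = PySem.List.pyRange (PySem.List.pyGetD v 0 0)
      (PySem.List.pyGetD v (-1) 0 + 1) 1
  · rw [if_pos ⟨by omega, hc⟩, if_pos ⟨hl, hc⟩]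
  · rw [if_neg (fun hx => hc hx.2), if_neg (fun hx => hc hx.2)]

theorem rest_short (v : List Int) (h : ¬ 2 ≤ v.length) :
    fieldA_rest v = PySem.Str.join "," (v.map PySem.Int.toStr) := by
  unfold fieldA_rest
  rw [if_neg (fun hx => by omega)]

-- B's candidate loop, evaluated into an explicit conditional chain
theorem B_eval (values : List Int) (lo hi : Int) :
    field_to_canonical_py_alt values lo hi =
      if values = PySem.List.pyRange lo (hi + 1) 1 then "*"
      else if 2 ≤ values.length ∧
          1 < PySem.List.pyGetD values 1 0 - PySem.List.pyGetD values 0 0 ∧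
          values = PySem.List.pyRange lo (hi + 1)
            (PySem.List.pyGetD values 1 0 - PySem.List.pyGetD values 0 0) then
        "*/" ++ PySem.Int.toStr (PySem.List.pyGetD values 1 0 - PySem.List.pyGetD values 0 0)
      else if 2 ≤ values.length ∧
          values = PySem.List.pyRange (PySem.List.pyGetD values 0 0)
            (PySem.List.pyGetD values (-1) 0 + 1) 1 then
        PySem.Int.toStr (PySem.List.pyGetD values 0 0) ++ "-" ++
          PySem.Int.toStr (PySem.List.pyGetD values (-1) 0)
      else PySem.Str.join "," (values.map PySem.Int.toStr) := by
  simp only [field_to_canonical_py_alt]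
  by_cases hl : 2 ≤ values.length
  · rw [if_pos hl]
    by_cases hs : 1 < PySem.List.pyGetD values 1 0 - PySem.List.pyGetD values 0 0
    · rw [if_pos hs]
      simp only [List.cons_append, List.nil_append, fieldB_pick]
      by_cases h1 : values = PySem.List.pyRange lo (hi + 1) 1
      · rw [if_pos h1, if_pos h1]
      · rw [if_neg h1, if_neg h1]
        by_cases h2 : values = PySem.List.pyRange lo (hi + 1)
            (PySem.List.pyGetD values 1 0 - PySem.List.pyGetD values 0 0)
        · have c2 : 2 ≤ values.length ∧
              1 < PySem.List.pyGetD values 1 0 - PySem.List.pyGetD values 0 0 ∧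
              values = PySem.List.pyRange lo (hi + 1)
                (PySem.List.pyGetD values 1 0 - PySem.List.pyGetD values 0 0) := ⟨hl, hs, h2⟩
          rw [if_pos h2, if_pos c2]
        · have c2 : ¬(2 ≤ values.length ∧
              1 < PySem.List.pyGetD values 1 0 - PySem.List.pyGetD values 0 0 ∧
              values = PySem.List.pyRange lo (hi + 1)
                (PySem.List.pyGetD values 1 0 - PySem.List.pyGetD values 0 0)) :=
            fun hx => h2 hx.2.2
          rw [if_neg h2, if_neg c2]
          by_cases h3 : values = PySem.List.pyRange (PySem.List.pyGetD values 0 0)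
              (PySem.List.pyGetD values (-1) 0 + 1) 1
          · have c3 : 2 ≤ values.length ∧
                values = PySem.List.pyRange (PySem.List.pyGetD values 0 0)
                  (PySem.List.pyGetD values (-1) 0 + 1) 1 := ⟨hl, h3⟩
            rw [if_pos h3, if_pos c3]
          · have c3 : ¬(2 ≤ values.length ∧
                values = PySem.List.pyRange (PySem.List.pyGetD values 0 0)
                  (PySem.List.pyGetD values (-1) 0 + 1) 1) := fun hx => h3 hx.2
            rw [if_neg h3, if_neg c3]
    · rw [if_neg hs]
      simp only [List.cons_append, List.nil_append, fieldB_pick]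
      by_cases h1 : values = PySem.List.pyRange lo (hi + 1) 1
      · rw [if_pos h1, if_pos h1]
      · have c2 : ¬(2 ≤ values.length ∧
            1 < PySem.List.pyGetD values 1 0 - PySem.List.pyGetD values 0 0 ∧
            values = PySem.List.pyRange lo (hi + 1)
              (PySem.List.pyGetD values 1 0 - PySem.List.pyGetD values 0 0)) :=
          fun hx => hs hx.2.1
        rw [if_neg h1, if_neg h1, if_neg c2]
        by_cases h3 : values = PySem.List.pyRange (PySem.List.pyGetD values 0 0)
            (PySem.List.pyGetD values (-1) 0 + 1) 1
        · have c3 : 2 ≤ values.length ∧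
              values = PySem.List.pyRange (PySem.List.pyGetD values 0 0)
                (PySem.List.pyGetD values (-1) 0 + 1) 1 := ⟨hl, h3⟩
          rw [if_pos h3, if_pos c3]
        · have c3 : ¬(2 ≤ values.length ∧
              values = PySem.List.pyRange (PySem.List.pyGetD values 0 0)
                (PySem.List.pyGetD values (-1) 0 + 1) 1) := fun hx => h3 hx.2
          rw [if_neg h3, if_neg c3]
  · rw [if_neg hl]
    simp only [fieldB_pick]
    by_cases h1 : values = PySem.List.pyRange lo (hi + 1) 1
    · rw [if_pos h1, if_pos h1]
    · have c2 : ¬(2 ≤ values.length ∧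
          1 < PySem.List.pyGetD values 1 0 - PySem.List.pyGetD values 0 0 ∧
          values = PySem.List.pyRange lo (hi + 1)
            (PySem.List.pyGetD values 1 0 - PySem.List.pyGetD values 0 0)) :=
        fun hx => hl hx.1
      have c3 : ¬(2 ≤ values.length ∧
          values = PySem.List.pyRange (PySem.List.pyGetD values 0 0)
            (PySem.List.pyGetD values (-1) 0 + 1) 1) := fun hx => hl hx.1
      rw [if_neg h1, if_neg h1, if_neg c2, if_neg c3]

theorem field_eq (values : List Int) (lo hi : Int)
    (hnd : ¬ D_field_to_canonical_py values lo hi) :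
    field_to_canonical_py values lo hi = field_to_canonical_py_alt values lo hi := by
  rw [B_eval]
  simp only [field_to_canonical_py]
  by_cases h1 : values = PySem.List.pyRange lo (hi + 1) 1
  · rw [if_pos h1, if_pos h1]
  · rw [if_neg h1, if_neg h1]
    by_cases hl : 2 ≤ values.length
    · rw [if_pos hl]
      by_cases hs : 1 < PySem.List.pyGetD values 1 0 - PySem.List.pyGetD values 0 0
      · by_cases hr : values = PySem.List.pyRange lo (hi + 1)
            (PySem.List.pyGetD values 1 0 - PySem.List.pyGetD values 0 0)
        · obtain ⟨ha, hb, hd⟩ :=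
            range_step_char values lo (hi + 1) _ (by omega) hl hr
          have cA1 : 1 < PySem.List.pyGetD values 1 0 - PySem.List.pyGetD values 0 0 ∧
              ∀ i ∈ PySem.List.pyRange 1 (PySem.List.len values) 1,
                PySem.List.pyGetD values i 0 - PySem.List.pyGetD values (i - 1) 0 =
                  PySem.List.pyGetD values 1 0 - PySem.List.pyGetD values 0 0 :=
            ⟨hs, (allstep_iff values _).mpr hd⟩
          have cA2 : PySem.List.pyGetD values 0 0 = lo ∧
              PySem.List.pyGetD values (-1) 0 ≤ hi := ⟨ha, by omega⟩
          have cB : 2 ≤ values.length ∧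
              1 < PySem.List.pyGetD values 1 0 - PySem.List.pyGetD values 0 0 ∧
              values = PySem.List.pyRange lo (hi + 1)
                (PySem.List.pyGetD values 1 0 - PySem.List.pyGetD values 0 0) := ⟨hl, hs, hr⟩
          rw [if_pos cA1, if_pos cA2, if_pos cB]
        · have cB : ¬(2 ≤ values.length ∧
              1 < PySem.List.pyGetD values 1 0 - PySem.List.pyGetD values 0 0 ∧
              values = PySem.List.pyRange lo (hi + 1)
                (PySem.List.pyGetD values 1 0 - PySem.List.pyGetD values 0 0)) :=
            fun hx => hr hx.2.2
          rw [if_neg cB]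
          by_cases hall : ∀ i ∈ PySem.List.pyRange 1 (PySem.List.len values) 1,
              PySem.List.pyGetD values i 0 - PySem.List.pyGetD values (i - 1) 0 =
                PySem.List.pyGetD values 1 0 - PySem.List.pyGetD values 0 0
          · by_cases hbnd : PySem.List.pyGetD values 0 0 = lo ∧
                PySem.List.pyGetD values (-1) 0 ≤ hi
            · have hne : values ≠ [] := by
                intro hx
                rw [hx] at hl
                simp at hl
              have e0 := pyGetD_zero_head values hne
              have e1 := pyGetD_one_tail values hl
              have eL := pyGetD_neg_one_last values hne
              have hall' := (allstep_iff values _).mp hall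
              rw [e0, e1] at hs hall'
              rw [e0, eL] at hbnd
              by_cases hfit : values.getLast?.getD 0 +
                  (values.tail.head?.getD 0 - values.head?.getD 0) ≤ hi
              · exact absurd ⟨hl, hs, hall', hbnd.1, hfit⟩ hnd
              · refine absurd ?_ hr
                have hq := ap_eq_range values lo hi
                  (values.tail.head?.getD 0 - values.head?.getD 0)
                  (by omega) hl hbnd.1 hall' hbnd.2 (by omega)
                rw [e0, e1]
                exact hq
            · have cA1 : 1 < PySem.List.pyGetD values 1 0 - PySem.List.pyGetD values 0 0 ∧
                  ∀ i ∈ PySem.List.pyRange 1 (PySem.List.len values) 1,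
                    PySem.List.pyGetD values i 0 - PySem.List.pyGetD values (i - 1) 0 =
                      PySem.List.pyGetD values 1 0 - PySem.List.pyGetD values 0 0 :=
                ⟨hs, hall⟩
              rw [if_pos cA1, if_neg hbnd, rest_eq2 values hl]
          · have cA1 : ¬(1 < PySem.List.pyGetD values 1 0 - PySem.List.pyGetD values 0 0 ∧
                ∀ i ∈ PySem.List.pyRange 1 (PySem.List.len values) 1,
                  PySem.List.pyGetD values i 0 - PySem.List.pyGetD values (i - 1) 0 =
                    PySem.List.pyGetD values 1 0 - PySem.List.pyGetD values 0 0) :=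
              fun hx => hall hx.2
            rw [if_neg cA1, rest_eq2 values hl]
      · have cA1 : ¬(1 < PySem.List.pyGetD values 1 0 - PySem.List.pyGetD values 0 0 ∧
            ∀ i ∈ PySem.List.pyRange 1 (PySem.List.len values) 1,
              PySem.List.pyGetD values i 0 - PySem.List.pyGetD values (i - 1) 0 =
                PySem.List.pyGetD values 1 0 - PySem.List.pyGetD values 0 0) :=
          fun hx => hs hx.1
        have cB : ¬(2 ≤ values.length ∧
            1 < PySem.List.pyGetD values 1 0 - PySem.List.pyGetD values 0 0 ∧
            values = PySem.List.pyRange lo (hi + 1)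
              (PySem.List.pyGetD values 1 0 - PySem.List.pyGetD values 0 0)) :=
          fun hx => hs hx.2.1
        rw [if_neg cA1, if_neg cB, rest_eq2 values hl]
    · have cB : ¬(2 ≤ values.length ∧
          1 < PySem.List.pyGetD values 1 0 - PySem.List.pyGetD values 0 0 ∧
          values = PySem.List.pyRange lo (hi + 1)
            (PySem.List.pyGetD values 1 0 - PySem.List.pyGetD values 0 0)) :=
        fun hx => hl hx.1
      have cB3 : ¬(2 ≤ values.length ∧
          values = PySem.List.pyRange (PySem.List.pyGetD values 0 0)
            (PySem.List.pyGetD values (-1) 0 + 1) 1) := fun hx => hl hx.1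
      rw [if_neg hl, if_neg cB, if_neg cB3, rest_short values hl]

-- ===== VERDICT (by name: the statements are the Claim_ definitions above) =====
theorem field_to_canonical_py_spec : Claim_unchanged_field_to_canonical_py := by
  intro values lo hi _ hnd
  exact field_eq values lo hi hnd

theorem field_to_canonical_py_changed : Claim_changed_field_to_canonical_py := by
  unfold Claim_changed_field_to_canonical_py
  decide

theorem digitChar_ne_star (m : Nat) (h : m < 16) : Nat.digitChar m ≠ '*' := by
  interval_cases m <;> decide

theorem pv_ediv_bounds (N s : Int) (hs : 0 < s) :
    s * (N / s) ≤ N ∧ N < s * (N / s + 1) := by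
  have h := Int.mul_ediv_add_emod N s
  have h1 := Int.emod_nonneg N (by omega : s ≠ 0)
  have h2 := Int.emod_lt_of_pos N hs
  constructor <;> nlinarith

theorem toDigitsCore_ne_star (fuel n : Nat) (ds : List Char) (hds : '*' ∉ ds) :
    '*' ∉ Nat.toDigitsCore 10 fuel n ds := by
  induction fuel generalizing n ds with
  | zero => simpa [Nat.toDigitsCore] using hds
  | succ fuel ih =>
    have hd' : '*' ∉ (n % 10).digitChar :: ds := by
      intro hmem
      rcases List.mem_cons.mp hmem with h | h
      · exact digitChar_ne_star (n % 10) (by omega) h.symm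
      · exact hds h
    rw [Nat.toDigitsCore.eq_def]
    simp only []
    split
    · exact hd'
    · exact ih (n / 10) _ hd'

theorem toDigitsCore_ne_nil (fuel n : Nat) (ds : List Char) (h : ds ≠ []) :
    Nat.toDigitsCore 10 fuel n ds ≠ [] := by
  induction fuel generalizing n ds with
  | zero => simpa [Nat.toDigitsCore] using h
  | succ fuel ih =>
    rw [Nat.toDigitsCore.eq_def]
    simp only []
    split
    · simp
    · exact ih (n / 10) _ (by simp)

theorem toChars_ne_star (n : Int) : '*' ∉ PySem.Int.toChars n := by
  unfold PySem.Int.toChars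
  split
  · intro hmem
    rcases List.mem_cons.mp hmem with h | h
    · exact absurd h (by decide)
    · exact toDigitsCore_ne_star _ _ _ (by simp) h
  · exact toDigitsCore_ne_star _ _ _ (by simp)

theorem toChars_ne_nil (n : Int) : PySem.Int.toChars n ≠ [] := by
  unfold PySem.Int.toChars
  split
  · simp
  · rw [Nat.toDigits.eq_def, Nat.toDigitsCore.eq_def]
    simp only []
    split
    · simp
    · exact toDigitsCore_ne_nil _ _ _ (by simp)

theorem field_to_canonical_py_tight : Claim_exact_field_to_canonical_py := by
  intro values lo hi _ hD
  obtain ⟨hl, hs, hd, h0, hfit⟩ := hD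
  have hne : values ≠ [] := by
    intro h
    rw [h] at hl
    simp at hl
  have e0 := pyGetD_zero_head values hne
  have e1 := pyGetD_one_tail values hl
  have eL := pyGetD_neg_one_last values hne
  have hSpos : (0 : Int) < values.tail.head?.getD 0 - values.head?.getD 0 := by omega
  -- the differences are all > 1, so values is neither a unit range nor the full range
  have hd1ne : pvDiffs values ≠ [] := by
    intro h
    have := length_pvDiffs values
    rw [h] at this
    simp at this
    omega
  obtain ⟨d0, hd0⟩ := List.exists_mem_of_ne_nil _ hd1ne
  have hnot1 : ¬ (∀ d ∈ pvDiffs values, d = 1) := by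
    intro hone
    have hx := hd d0 hd0
    have hy := hone d0 hd0
    omega
  have hnfull : values ≠ PySem.List.pyRange lo (hi + 1) 1 := by
    intro hfull
    exact hnot1 (range_step_char values lo (hi + 1) 1 one_pos hl hfull).2.2
  -- values is not list(range(lo, hi+1, s)) either: that range runs on past values' last element
  have hnr : values ≠ PySem.List.pyRange lo (hi + 1)
      (values.tail.head?.getD 0 - values.head?.getD 0) := by
    intro hrange
    have hlt : values.length - 1 < values.length := by omega
    have hglast : values.getLast?.getD 0 =
        lo + (values.tail.head?.getD 0 - values.head?.getD 0) *
          ((values.length - 1 : Nat) : Int) := by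
      rw [List.getLast?_eq_getElem?, List.getElem?_eq_getElem hlt]
      simp only [Option.getD_some]
      rw [List.getElem_of_eq hrange hlt]
      exact getElem_pyRange_pos lo (hi + 1) _ hSpos _ _
    have hcast : ((values.length - 1 : Nat) : Int) = (values.length : Int) - 1 := by omega
    rw [hcast] at hglast
    have hab : lo < hi + 1 := by nlinarith [hfit, hglast, hSpos,
      (by omega : (2 : Int) ≤ (values.length : Int))]
    have hlen : (values.length : Int) =
        (hi + 1 - lo + (values.tail.head?.getD 0 - values.head?.getD 0) - 1) /
          (values.tail.head?.getD 0 - values.head?.getD 0) := by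
      have hle := congrArg List.length hrange
      rw [PySem.List.pyRange_of_pos lo (hi + 1) hSpos, List.length_map, List.length_range,
        if_pos hab] at hle
      have hq0 : 0 ≤ (hi + 1 - lo + (values.tail.head?.getD 0 - values.head?.getD 0) - 1) /
          (values.tail.head?.getD 0 - values.head?.getD 0) :=
        Int.ediv_nonneg (by omega) (by omega)
      omega
    obtain ⟨hb1, hb2⟩ := pv_ediv_bounds
      (hi + 1 - lo + (values.tail.head?.getD 0 - values.head?.getD 0) - 1)
      (values.tail.head?.getD 0 - values.head?.getD 0) hSpos
    rw [← hlen] at hb1 hb2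
    nlinarith [hfit, hglast, hb2]
  have hd' : ∀ d ∈ pvDiffs values,
      d = PySem.List.pyGetD values 1 0 - PySem.List.pyGetD values 0 0 := by
    rw [e0, e1]
    exact hd
  -- A takes the '*/step' branch
  have hA : field_to_canonical_py values lo hi =
      "*/" ++ PySem.Int.toStr (values.tail.head?.getD 0 - values.head?.getD 0) := by
    simp only [field_to_canonical_py]
    have hs' : 1 < PySem.List.pyGetD values 1 0 - PySem.List.pyGetD values 0 0 := by
      rw [e0, e1]
      exact hs
    have h0' : PySem.List.pyGetD values 0 0 = lo := by
      rw [e0]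
      exact h0
    have hlast' : PySem.List.pyGetD values (-1) 0 ≤ hi := by
      rw [eL]
      omega
    rw [if_neg hnfull, if_pos hl, if_pos ⟨hs', (allstep_iff values _).mpr hd'⟩,
      if_pos ⟨h0', hlast'⟩, e0, e1]
  -- B falls through to the comma join
  have hB : field_to_canonical_py_alt values lo hi =
      PySem.Str.join "," (values.map PySem.Int.toStr) := by
    rw [B_eval, if_neg hnfull]
    have c2 : ¬(2 ≤ values.length ∧
        1 < PySem.List.pyGetD values 1 0 - PySem.List.pyGetD values 0 0 ∧
        values = PySem.List.pyRange lo (hi + 1)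
          (PySem.List.pyGetD values 1 0 - PySem.List.pyGetD values 0 0)) := by
      rw [e0, e1]
      exact fun hx => hnr hx.2.2
    have c3 : ¬(2 ≤ values.length ∧
        values = PySem.List.pyRange (PySem.List.pyGetD values 0 0)
          (PySem.List.pyGetD values (-1) 0 + 1) 1) := by
      intro hx
      exact hnot1 (range_step_char values _ _ 1 one_pos hl hx.2).2.2
    rw [if_neg c2, if_neg c3]
  rw [hA, hB]
  intro heq
  have htl := congrArg String.toList heq
  obtain ⟨a, ta, hva⟩ := List.exists_cons_of_ne_nil hne
  have hta : ta ≠ [] := by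
    intro h
    rw [hva, h] at hl
    simp at hl
  obtain ⟨b, tb, hvb⟩ := List.exists_cons_of_ne_nil hta
  rw [String.toList_append, PySem.Str.toList_join, hva, hvb, List.map_cons, List.map_cons,
    List.map_cons, List.map_cons, PySem.Chars.join_cons_cons, PySem.Int.toList_toStr,
    PySem.Int.toList_toStr] at htl
  have hhd := congrArg List.head? htl
  rw [List.head?_append, List.head?_append, List.head?_append,
    List.head?_eq_some_head (toChars_ne_nil a)] at hhd
  have hstar : ("*/" : String).toList.head? = some '*' := rfl
  rw [hstar] at hhd
  simp only [Option.some_or] at hhd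
  have hh : (PySem.Int.toChars a).head (toChars_ne_nil a) = '*' := (Option.some.inj hhd).symm
  exact toChars_ne_star a (hh ▸ List.head_mem (toChars_ne_nil a))
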